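-- pv_equiv track=rewrite | github.com/2baSW/TP_BDA_Baba_SOW | TP2/exo4.py | est_cle_candidate
-- ===== SOURCE A (Python) =====
-- def calculer_cloture_attributs(F: "list of dependencies", K: "set"):
--     fermeture = set(K)
--     taille = -1
--     while taille != len(fermeture):
--         taille = len(fermeture)
--         for antecedent, consequent in F:
--             if antecedent.issubset(fermeture):
--                 fermeture.update(consequent)
--     return fermeture
--
-- def est_super_cle(F: "list of dependencies", R: "set", K: "set"):
--     return R.issubset(calculer_cloture_attributs(F, K))
--
-- def est_cle_candidate(F: "list of dependencies", R: "set", K: "set"):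
--     if not est_super_cle(F, R, K):
--         return False
--     for attribut in K:
--         sous_ensemble = set(K)
--         sous_ensemble.discard(attribut)
--         if est_super_cle(F, R, sous_ensemble):
--             return False
--     return True
-- ===== SOURCE B (Python) =====
-- def est_cle_candidate(F, R, K):
--     # Attribute-driven propagation with an inverted index (attr -> dependencies):
--     # the closure grows by processing one attribute at a time from a queue; each
--     # attribute's index entry is consumed exactly once, instead of A's repeated
--     # full passes over F until the closure size stabilises.
--     index = {}
--     for ant, cons in F:
--         for x in ant:
--             index.setdefault(x, []).append((ant, cons))
--     seed = [x for ant, cons in F if not ant for x in cons]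
--
--     def cloture(start):
--         closed = set()
--         idx = dict(index)  # consumed by this run; the stored lists are never mutated
--         queue = list(start) + seed
--         while queue:
--             x = queue.pop(0)
--             if x in closed:
--                 continue
--             closed.add(x)
--             for ant, cons in idx.pop(x, []):
--                 if ant <= closed:
--                     queue.extend(cons)
--         return closed
--
--     if not (R <= cloture(K)):
--         return False
--     return all(not (R <= cloture(set(K) - {x})) for x in K)
-- ===== Notes on version B (the rewrite author's own statement) =====
-- stated objective: alternative
-- what changed: The attribute closure is computed by attribute-driven propagation: an inverted index attr->dependencies is built once, and a queue of attributes is processed one attribute at a time, consuming each attribute's index entry exactly once, instead of A's fixed-point iteration of full passes over F until the closure size stabilises.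
import Mathlib
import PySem

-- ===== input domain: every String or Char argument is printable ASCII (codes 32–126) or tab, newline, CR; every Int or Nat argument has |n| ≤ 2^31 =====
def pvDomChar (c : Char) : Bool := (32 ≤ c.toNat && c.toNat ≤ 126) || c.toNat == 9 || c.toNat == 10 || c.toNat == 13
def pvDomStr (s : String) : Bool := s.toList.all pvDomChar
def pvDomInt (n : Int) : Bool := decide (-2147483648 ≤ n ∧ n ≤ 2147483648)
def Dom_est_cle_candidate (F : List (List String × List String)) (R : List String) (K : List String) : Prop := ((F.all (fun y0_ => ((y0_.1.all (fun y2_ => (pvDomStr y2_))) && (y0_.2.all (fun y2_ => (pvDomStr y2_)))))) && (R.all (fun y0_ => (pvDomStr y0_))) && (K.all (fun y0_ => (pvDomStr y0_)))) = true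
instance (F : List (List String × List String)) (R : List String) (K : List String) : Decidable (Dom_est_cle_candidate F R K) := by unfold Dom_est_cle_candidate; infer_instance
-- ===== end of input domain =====

-- B replaces A's size-stabilising full passes over F by attribute-driven propagation:
-- an inverted index attr → dependencies is built once and a queue of attributes is
-- processed one attribute at a time, each attribute's index entry consumed exactly
-- once; equivalence of the RETURN value is proved via a common derivability
-- characterisation of the closure.

-- ===== PORT A =====
-- one 'for antecedent, consequent in F' pass of the while-loop body
def pvPassA (F : List (List String × List String)) (S : PySem.Set String) : PySem.Set String :=
  F.foldl (fun fermeture d =>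
    if PySem.Set.issubset d.1 fermeture then PySem.Set.update fermeture d.2 else fermeture) S

-- the 'while taille != len(fermeture)' loop; fuel is only a totality guard
-- (proved sufficient below: each continued pass strictly grows the set, which
-- stays inside K ++ all consequents)
def pvLoopA (fuel : Nat) (F : List (List String × List String)) (S : PySem.Set String) : PySem.Set String :=
  match fuel with
  | 0 => S
  | n + 1 =>
    let S' := pvPassA F S
    if S'.length = S.length then S' else pvLoopA n F S'

def calculer_cloture_attributs (F : List (List String × List String)) (K : List String) : PySem.Set String :=
  pvLoopA (K.length + (F.map (fun d => d.2.length)).sum + 1) F (PySem.Set.ofList K)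

def est_super_cle (F : List (List String × List String)) (R : List String) (K : List String) : Bool :=
  PySem.Set.issubset R (calculer_cloture_attributs F K)

def est_cle_candidate (F : List (List String × List String)) (R : List String) (K : List String) : Bool :=
  if !est_super_cle F R K then false
  else if K.any (fun attribut => est_super_cle F R (PySem.Set.discard (PySem.Set.ofList K) attribut)) then false
  else true

-- ===== PORT B =====
-- index = {}; for ant, cons in F: for x in ant: index.setdefault(x, []).append((ant, cons))
def pvBuildIndex (F : List (List String × List String)) :
    PySem.Dict String (List (List String × List String)) :=
  F.foldl (fun d p =>
    p.1.foldl (fun d x => PySem.Dict.insert d x (PySem.Dict.getD d x [] ++ [p])) d)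
    PySem.Dict.empty

-- seed = [x for ant, cons in F if not ant for x in cons]
def pvSeed (F : List (List String × List String)) : List String :=
  F.flatMap (fun p => if p.1.isEmpty then p.2 else [])

-- termination helpers for the while loop (cited by decreasing_by)
theorem pvSize_erase_lt {κ ν : Type} [BEq κ] (d : PySem.Dict κ ν) (k : κ)
    (h : d.contains k = true) : (d.erase k).size < d.size := by
  simp only [PySem.Dict.erase, PySem.Dict.size, PySem.Dict.contains, List.any_eq_true] at *
  rw [List.length_filter_lt_length_iff_exists]
  obtain ⟨p, hp, hpk⟩ := h
  exact ⟨p, hp, by simp [hpk]⟩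

theorem pvErase_not_contains {κ ν : Type} [BEq κ] (d : PySem.Dict κ ν) (k : κ)
    (h : d.contains k = false) : d.erase k = d := by
  simp only [PySem.Dict.erase, PySem.Dict.contains, List.any_eq_false] at *
  apply PySem.Dict.ext
  simp only [List.filter_eq_self]
  intro p hp
  simp [h p hp]

-- the 'while queue:' loop: pop one attribute, consume its index entry, fire the
-- indexed dependencies whose antecedent is now contained in the closure
def pvClosLoop (idx : PySem.Dict String (List (List String × List String)))
    (closed : PySem.Set String) (queue : List String) : PySem.Set String :=
  match queue with
  | [] => closed
  | x :: rest =>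
    if PySem.Set.contains closed x then pvClosLoop idx closed rest
    else
      let closed' := PySem.Set.add closed x
      pvClosLoop (PySem.Dict.erase idx x) closed'
        (rest ++ (PySem.Dict.getD idx x []).foldl
          (fun q p => if PySem.Set.issubset p.1 closed' then q ++ p.2 else q) [])
termination_by (idx.size, queue.length)
decreasing_by
  · exact Prod.Lex.right _ (Nat.lt_succ_self _)
  · by_cases h : PySem.Dict.contains idx x
    · exact Prod.Lex.left _ _ (pvSize_erase_lt idx x h)
    · rw [pvErase_not_contains idx x (by simp [h]),
        PySem.Dict.getD_of_not_contains idx _ (by simp [h])]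
      exact Prod.Lex.right _ (by simp)

def pvClotureB (F : List (List String × List String)) (attrs : List String) : PySem.Set String :=
  pvClosLoop (pvBuildIndex F) PySem.Set.empty (attrs ++ pvSeed F)

def est_cle_candidate_alt (F : List (List String × List String)) (R : List String) (K : List String) : Bool :=
  if !(PySem.Set.issubset R (pvClotureB F K)) then false
  else K.all (fun a => !(PySem.Set.issubset R (pvClotureB F (PySem.Set.diff (PySem.Set.ofList K) [a]))))

-- ===== PRECONDITION & SPEC =====
def Spec_est_cle_candidate (F : List (List String × List String)) (R : List String) (K : List String) (out : Bool) : Prop := out = est_cle_candidate_alt F R K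
instance (F : List (List String × List String)) (R : List String) (K : List String) (out : Bool) : Decidable (Spec_est_cle_candidate F R K out) := by unfold Spec_est_cle_candidate; infer_instance

-- ===== CLAIM (what is proved, stated in full; the proofs are below) =====
def Claim_equal_est_cle_candidate : Prop := ∀ (F : List (List String × List String)) (R : List String) (K : List String), Dom_est_cle_candidate F R K → Spec_est_cle_candidate F R K (est_cle_candidate F R K)

-- ===== LEMMAS AND PROOFS =====

-- derivability: x is in the attribute closure of a start predicate P under F
inductive pvDeriv (F : List (List String × List String)) (P : String → Prop) : String → Prop
  | base {x : String} : P x → pvDeriv F P x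
  | step {d : List String × List String} {x : String} :
      d ∈ F → (∀ y ∈ d.1, pvDeriv F P y) → x ∈ d.2 → pvDeriv F P x

theorem pvDeriv_congr {F : List (List String × List String)} {P Q : String → Prop}
    (h : ∀ x, P x ↔ Q x) {x : String} (hx : pvDeriv F P x) : pvDeriv F Q x := by
  induction hx with
  | base hp => exact pvDeriv.base ((h _).mp hp)
  | step hd hant hc ih => exact pvDeriv.step hd (fun y hy => ih y hy) hc

-- ---- pass (A) lemmas ----
theorem pvPassA_cons (d : List String × List String) (F : List (List String × List String))
    (S : PySem.Set String) :
    pvPassA (d :: F) S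
      = pvPassA F (if PySem.Set.issubset d.1 S then PySem.Set.update S d.2 else S) := rfl

theorem pvPassA_prefix (F : List (List String × List String)) (S : PySem.Set String) :
    ∃ t, pvPassA F S = S ++ t := by
  induction F generalizing S with
  | nil => exact ⟨[], (List.append_nil S).symm⟩
  | cons d F ih =>
    rw [pvPassA_cons]
    by_cases h : PySem.Set.issubset d.1 S = true
    · rw [if_pos h, PySem.Set.update_eq_append_filter]
      obtain ⟨t1, ht1⟩ := ih (S ++ ((PySem.Set.ofList d.2).filter (fun y => !(PySem.Set.contains S y))))
      exact ⟨_, by rw [ht1, List.append_assoc]⟩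
    · rw [if_neg h]; exact ih S

theorem pvPassA_supset {F : List (List String × List String)} {S : PySem.Set String}
    {x : String} (hx : x ∈ S) : x ∈ pvPassA F S := by
  obtain ⟨t, ht⟩ := pvPassA_prefix F S
  rw [ht]; exact List.mem_append_left _ hx

theorem pvPassA_nodup {F : List (List String × List String)} {S : PySem.Set String}
    (h : S.Nodup) : (pvPassA F S).Nodup := by
  induction F generalizing S with
  | nil => exact h
  | cons d F ih =>
    rw [pvPassA_cons]
    by_cases hc : PySem.Set.issubset d.1 S = true
    · rw [if_pos hc]; exact ih (PySem.Set.nodup_update _ _ h)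
    · rw [if_neg hc]; exact ih h

theorem pvPassA_mem_bound {F : List (List String × List String)} {S : PySem.Set String}
    {x : String} (hx : x ∈ pvPassA F S) : x ∈ S ∨ ∃ d ∈ F, x ∈ d.2 := by
  induction F generalizing S with
  | nil => exact Or.inl hx
  | cons d F ih =>
    rw [pvPassA_cons] at hx
    rcases ih hx with hstep | ⟨e, he, hxe⟩
    · by_cases hc : PySem.Set.issubset d.1 S = true
      · rw [if_pos hc] at hstep
        rcases (PySem.Set.mem_update _ _ _).mp hstep with hS | hd2
        · exact Or.inl hS
        · exact Or.inr ⟨d, List.mem_cons_self, hd2⟩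
      · rw [if_neg hc] at hstep; exact Or.inl hstep
    · exact Or.inr ⟨e, List.mem_cons_of_mem _ he, hxe⟩

theorem pvPassA_fires {F : List (List String × List String)} {S : PySem.Set String}
    {d : List String × List String} (hd : d ∈ F) (hant : ∀ y ∈ d.1, y ∈ S) :
    ∀ x ∈ d.2, x ∈ pvPassA F S := by
  induction F generalizing S with
  | nil => cases hd
  | cons e F ih =>
    intro x hx
    rw [pvPassA_cons]
    rcases List.mem_cons.mp hd with rfl | hdF
    · have hc : PySem.Set.issubset d.1 S = true :=
        (PySem.Set.issubset_iff _ _).mpr hant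
      rw [if_pos hc]
      exact pvPassA_supset ((PySem.Set.mem_update _ _ _).mpr (Or.inr hx))
    · have hstep : ∀ y ∈ d.1, y ∈ (if PySem.Set.issubset e.1 S then PySem.Set.update S e.2 else S) := by
        intro y hy
        by_cases hc : PySem.Set.issubset e.1 S = true
        · rw [if_pos hc]; exact (PySem.Set.mem_update _ _ _).mpr (Or.inl (hant y hy))
        · rw [if_neg hc]; exact hant y hy
      exact ih hdF hstep x hx

theorem pvPassA_min {F : List (List String × List String)} {S : PySem.Set String}
    {T : String → Prop}
    (hT : ∀ d ∈ F, (∀ y ∈ d.1, T y) → ∀ x ∈ d.2, T x)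
    (hS : ∀ x ∈ S, T x) : ∀ x ∈ pvPassA F S, T x := by
  induction F generalizing S with
  | nil => exact hS
  | cons d F ih =>
    rw [pvPassA_cons]
    refine ih (fun e he => hT e (List.mem_cons_of_mem _ he)) ?_
    by_cases hc : PySem.Set.issubset d.1 S = true
    · rw [if_pos hc]
      intro x hx
      rcases (PySem.Set.mem_update _ _ _).mp hx with hxS | hxd
      · exact hS x hxS
      · exact hT d List.mem_cons_self (fun y hy => hS y ((PySem.Set.issubset_iff _ _).mp hc y hy)) x hxd
    · rw [if_neg hc]; exact hS

theorem pvNodupSubsetLen {l1 l2 : List String} (h1 : l1.Nodup) (h2 : ∀ x ∈ l1, x ∈ l2) :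
    l1.length ≤ l2.length := by
  calc l1.length = l1.toFinset.card := (List.toFinset_card_of_nodup h1).symm
    _ ≤ l2.toFinset.card := Finset.card_le_card (by
        intro x hx
        rw [List.mem_toFinset] at *
        exact h2 x hx)
    _ ≤ l2.length := l2.toFinset_card_le

-- ---- loop (A) lemmas ----
theorem pvLoopA_succ (n : Nat) (F : List (List String × List String)) (S : PySem.Set String) :
    pvLoopA (n + 1) F S
      = if (pvPassA F S).length = S.length then pvPassA F S else pvLoopA n F (pvPassA F S) := rfl

theorem pvLoopA_supset (fuel : Nat) (F : List (List String × List String)) (S : PySem.Set String)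
    {x : String} (hx : x ∈ S) : x ∈ pvLoopA fuel F S := by
  induction fuel generalizing S with
  | zero => exact hx
  | succ n ih =>
    rw [pvLoopA_succ]
    by_cases h : (pvPassA F S).length = S.length
    · rw [if_pos h]; exact pvPassA_supset hx
    · rw [if_neg h]; exact ih _ (pvPassA_supset hx)

theorem pvLoopA_min (fuel : Nat) (F : List (List String × List String)) (S : PySem.Set String)
    {T : String → Prop}
    (hT : ∀ d ∈ F, (∀ y ∈ d.1, T y) → ∀ x ∈ d.2, T x)
    (hS : ∀ x ∈ S, T x) : ∀ x ∈ pvLoopA fuel F S, T x := by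
  induction fuel generalizing S with
  | zero => exact hS
  | succ n ih =>
    rw [pvLoopA_succ]
    by_cases h : (pvPassA F S).length = S.length
    · rw [if_pos h]; exact pvPassA_min hT hS
    · rw [if_neg h]; exact ih _ (pvPassA_min hT hS)

-- with enough fuel the loop reaches a fixpoint of the pass
theorem pvLoopA_fix (U : List String) (fuel : Nat) (F : List (List String × List String))
    (S : PySem.Set String) (hnd : S.Nodup) (hSU : ∀ x ∈ S, x ∈ U)
    (hFU : ∀ d ∈ F, ∀ x ∈ d.2, x ∈ U) (hfuel : U.length < S.length + fuel) :
    pvPassA F (pvLoopA fuel F S) = pvLoopA fuel F S := by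
  induction fuel generalizing S with
  | zero =>
    exfalso
    have : S.length ≤ U.length := pvNodupSubsetLen hnd hSU
    omega
  | succ n ih =>
    obtain ⟨t, ht⟩ := pvPassA_prefix F S
    rw [pvLoopA_succ]
    by_cases h : (pvPassA F S).length = S.length
    · rw [if_pos h]
      have hlen : t.length = 0 := by
        have := congrArg List.length ht
        simp only [List.length_append] at this
        omega
      have hSS : pvPassA F S = S := by
        rw [ht, List.length_eq_zero_iff.mp hlen, List.append_nil]
      rw [hSS]; exact hSS
    · rw [if_neg h]
      refine ih _ (pvPassA_nodup hnd) ?_ ?_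
      · intro x hx
        rcases pvPassA_mem_bound hx with hxS | ⟨d, hd, hxd⟩
        · exact hSU x hxS
        · exact hFU d hd x hxd
      · have hlen : S.length < (pvPassA F S).length := by
          have := congrArg List.length ht
          simp only [List.length_append] at this
          omega
        omega

theorem pvClotureA_fix (F : List (List String × List String)) (K : List String) :
    pvPassA F (calculer_cloture_attributs F K) = calculer_cloture_attributs F K := by
  unfold calculer_cloture_attributs
  apply pvLoopA_fix (K ++ F.flatMap (fun d => d.2))
  · exact PySem.Set.nodup_ofList K
  · intro x hx
    exact List.mem_append_left _ ((PySem.Set.mem_ofList _ _).mp hx)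
  · intro d hd x hx
    exact List.mem_append_right _ (List.mem_flatMap.mpr ⟨d, hd, hx⟩)
  · have h1 : (PySem.Set.ofList K).length ≤ K.length := PySem.Set.length_ofList_le K
    have h2 : (F.flatMap (fun d => d.2)).length = (F.map (fun d => d.2.length)).sum := by
      rw [List.length_flatMap]
    simp only [List.length_append]
    omega

theorem pvClotureA_iff (F : List (List String × List String)) (K : List String) (x : String) :
    x ∈ calculer_cloture_attributs F K ↔ pvDeriv F (· ∈ K) x := by
  constructor
  · intro hx
    refine pvLoopA_min _ _ _ ?_ ?_ x hx
    · intro d hd hant y hy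
      exact pvDeriv.step hd hant hy
    · intro y hy
      exact pvDeriv.base ((PySem.Set.mem_ofList _ _).mp hy)
  · intro hx
    induction hx with
    | base hp =>
      exact pvLoopA_supset _ _ _ ((PySem.Set.mem_ofList _ _).mpr hp)
    | step hd _ hc ih =>
      rw [← pvClotureA_fix F K]
      exact pvPassA_fires hd ih _ hc

-- ---- index (B) lemmas ----
theorem pvMem_indexInner (p : List String × List String) (ant : List String)
    (d : PySem.Dict String (List (List String × List String)))
    (y : String) (q : List String × List String) :
    q ∈ PySem.Dict.getD
        (ant.foldl (fun d x => PySem.Dict.insert d x (PySem.Dict.getD d x [] ++ [p])) d) y []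
      ↔ q ∈ PySem.Dict.getD d y [] ∨ (q = p ∧ y ∈ ant) := by
  induction ant generalizing d with
  | nil => simp
  | cons x xs ih =>
    simp only [List.foldl_cons, ih, PySem.Dict.getD_insert, List.mem_cons]
    by_cases hxy : y = x
    · subst hxy
      rw [if_pos rfl]
      simp only [List.mem_append, List.mem_singleton]
      tauto
    · rw [if_neg hxy]
      tauto

theorem pvMem_buildIndex (F : List (List String × List String)) (y : String)
    (q : List String × List String) :
    q ∈ PySem.Dict.getD (pvBuildIndex F) y [] ↔ q ∈ F ∧ y ∈ q.1 := by
  unfold pvBuildIndex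
  suffices h : ∀ (d : PySem.Dict String (List (List String × List String))),
      q ∈ PySem.Dict.getD
          (F.foldl (fun d p =>
            p.1.foldl (fun d x => PySem.Dict.insert d x (PySem.Dict.getD d x [] ++ [p])) d) d) y []
        ↔ q ∈ PySem.Dict.getD d y [] ∨ (q ∈ F ∧ y ∈ q.1) by
    rw [h PySem.Dict.empty]
    simp [PySem.Dict.getD_empty]
  induction F with
  | nil => simp
  | cons p F ih =>
    intro d
    simp only [List.foldl_cons, ih, pvMem_indexInner, List.mem_cons]
    constructor
    · rintro ((h | ⟨rfl, hy⟩) | ⟨hq, hy⟩)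
      · exact Or.inl h
      · exact Or.inr ⟨Or.inl rfl, hy⟩
      · exact Or.inr ⟨Or.inr hq, hy⟩
    · rintro (h | ⟨(rfl | hq), hy⟩)
      · exact Or.inl (Or.inl h)
      · exact Or.inl (Or.inr ⟨rfl, hy⟩)
      · exact Or.inr ⟨hq, hy⟩

-- erasing one key: other keys unchanged, the erased key gone
theorem pvGet?_erase_self (d : PySem.Dict String (List (List String × List String)))
    (x : String) : PySem.Dict.get? (d.erase x) x = none := by
  simp only [PySem.Dict.get?, PySem.Dict.erase, Option.map_eq_none_iff]
  rw [List.find?_eq_none]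
  intro p hp
  have h := (List.mem_filter.mp hp).2
  simp only [Bool.not_eq_eq_eq_not, Bool.not_true] at h
  simp [h]

theorem pvFind?_filter_ne (x y : String) (hyx : y ≠ x)
    (l : List (String × List (List String × List String))) :
    List.find? (fun p => p.1 == y) (l.filter (fun p => !(p.1 == x)))
      = List.find? (fun p => p.1 == y) l := by
  induction l with
  | nil => rfl
  | cons p ps ih =>
    rw [List.filter_cons]
    by_cases hp : p.1 = x
    · rw [if_neg (by simp [hp]), List.find?_cons_of_neg (by simp [hp, Ne.symm hyx])]
      exact ih
    · rw [if_pos (by simp [hp])]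
      by_cases hpy : p.1 = y
      · rw [List.find?_cons_of_pos (by simp [hpy]), List.find?_cons_of_pos (by simp [hpy])]
      · rw [List.find?_cons_of_neg (by simp [hpy]), List.find?_cons_of_neg (by simp [hpy])]
        exact ih

theorem pvGet?_erase_ne (d : PySem.Dict String (List (List String × List String)))
    (x y : String) (hyx : y ≠ x) :
    PySem.Dict.get? (d.erase x) y = PySem.Dict.get? d y := by
  simp only [PySem.Dict.get?, PySem.Dict.erase]
  rw [pvFind?_filter_ne x y hyx]

theorem pvGetD_erase (d : PySem.Dict String (List (List String × List String)))
    (x y : String) :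
    PySem.Dict.getD (d.erase x) y []
      = if y = x then [] else PySem.Dict.getD d y [] := by
  by_cases hyx : y = x
  · subst hyx
    simp [PySem.Dict.getD, pvGet?_erase_self]
  · simp [PySem.Dict.getD, pvGet?_erase_ne d x y hyx, hyx]

theorem pvMem_seed (F : List (List String × List String)) (z : String) :
    z ∈ pvSeed F ↔ ∃ p ∈ F, p.1 = [] ∧ z ∈ p.2 := by
  unfold pvSeed
  simp only [List.mem_flatMap]
  constructor
  · rintro ⟨p, hp, hz⟩
    by_cases h : p.1.isEmpty
    · exact ⟨p, hp, List.isEmpty_iff.mp h, by simpa [h] using hz⟩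
    · simp [h] at hz
  · rintro ⟨p, hp, h1, hz⟩
    exact ⟨p, hp, by simp [h1, hz]⟩

-- the fired pushes of one loop step
theorem pvMem_pushes (L : List (List String × List String)) (c : PySem.Set String)
    (acc : List String) (z : String) :
    z ∈ L.foldl (fun q p => if PySem.Set.issubset p.1 c then q ++ p.2 else q) acc
      ↔ z ∈ acc ∨ ∃ p ∈ L, PySem.Set.issubset p.1 c = true ∧ z ∈ p.2 := by
  induction L generalizing acc with
  | nil => simp
  | cons p L ih =>
    simp only [List.foldl_cons, List.mem_cons]
    by_cases h : PySem.Set.issubset p.1 c = true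
    · simp only [if_pos h, ih, List.mem_append]
      constructor
      · rintro ((hz | hz) | ⟨e, he, hs, hz⟩)
        · exact Or.inl hz
        · exact Or.inr ⟨p, Or.inl rfl, h, hz⟩
        · exact Or.inr ⟨e, Or.inr he, hs, hz⟩
      · rintro (hz | ⟨e, (rfl | he), hs, hz⟩)
        · exact Or.inl (Or.inl hz)
        · exact Or.inl (Or.inr hz)
        · exact Or.inr ⟨e, he, hs, hz⟩
    · simp only [if_neg h, ih]
      constructor
      · rintro (hz | ⟨e, he, hs, hz⟩)
        · exact Or.inl hz
        · exact Or.inr ⟨e, Or.inr he, hs, hz⟩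
      · rintro (hz | ⟨e, (rfl | he), hs, hz⟩)
        · exact Or.inl hz
        · exact absurd hs h
        · exact Or.inr ⟨e, he, hs, hz⟩

-- ---- loop (B) invariant lemmas ----
theorem pvClosLoop_mono (idx : PySem.Dict String (List (List String × List String)))
    (closed : PySem.Set String) (queue : List String)
    {y : String} (hy : y ∈ closed) : y ∈ pvClosLoop idx closed queue := by
  revert hy
  fun_induction pvClosLoop idx closed queue with
  | case1 => exact fun hy => hy
  | case2 idx closed x rest hmem ih => exact ih
  | case3 idx closed x rest hmem closed2 ih =>
    exact fun hy => ih ((PySem.Set.mem_add _ _ _).mpr (Or.inl hy))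

theorem pvClosLoop_queue (idx : PySem.Dict String (List (List String × List String)))
    (closed : PySem.Set String) (queue : List String)
    {y : String} (hy : y ∈ queue) : y ∈ pvClosLoop idx closed queue := by
  revert hy
  fun_induction pvClosLoop idx closed queue with
  | case1 => exact fun hy => absurd hy (List.not_mem_nil)
  | case2 idx closed x rest hmem ih =>
    intro hy
    rcases List.mem_cons.mp hy with rfl | hy
    · exact pvClosLoop_mono _ _ _ ((PySem.Set.contains_iff _ _).mp hmem)
    · exact ih hy
  | case3 idx closed x rest hmem closed2 ih =>
    intro hy
    rcases List.mem_cons.mp hy with rfl | hy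
    · exact pvClosLoop_mono _ _ _ ((PySem.Set.mem_add _ _ _).mpr (Or.inr rfl))
    · exact ih (List.mem_append_left _ hy)

theorem pvClosLoop_min (F : List (List String × List String))
    (idx : PySem.Dict String (List (List String × List String)))
    (closed : PySem.Set String) (queue : List String) {T : String → Prop}
    (hT : ∀ p ∈ F, (∀ y ∈ p.1, T y) → ∀ z ∈ p.2, T z)
    (hidx : ∀ y q, q ∈ PySem.Dict.getD idx y [] → q ∈ F)
    (hc : ∀ y ∈ closed, T y) (hq : ∀ y ∈ queue, T y) :
    ∀ y ∈ pvClosLoop idx closed queue, T y := by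
  revert hidx hc hq
  fun_induction pvClosLoop idx closed queue with
  | case1 => exact fun _ hc _ => hc
  | case2 idx closed x rest hmem ih =>
    intro hidx hc hq
    exact ih hidx hc (fun y hy => hq y (List.mem_cons_of_mem _ hy))
  | case3 idx closed x rest hmem closed2 ih =>
    intro hidx hc hq
    have hTx : T x := hq x List.mem_cons_self
    have hc' : ∀ y ∈ PySem.Set.add closed x, T y := by
      intro y hy
      rcases (PySem.Set.mem_add _ _ _).mp hy with hy | rfl
      · exact hc y hy
      · exact hTx
    refine ih ?_ hc' ?_
    · intro y q hqy
      have hqy' := pvGetD_erase idx x y ▸ hqy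
      by_cases hyx : y = x
      · simp [hyx] at hqy'
      · exact hidx y q (by simpa [hyx] using hqy')
    · intro y hy
      rcases List.mem_append.mp hy with hy | hy
      · exact hq y (List.mem_cons_of_mem _ hy)
      · rcases (pvMem_pushes _ _ _ _).mp hy with hfalse | ⟨p, hpL, hs, hz⟩
        · cases hfalse
        · exact hT p (hidx x p hpL)
            (fun u hu => hc' u ((PySem.Set.issubset_iff _ _).mp hs u hu)) y hz

theorem pvClosLoop_closed (F : List (List String × List String))
    (idx : PySem.Dict String (List (List String × List String)))
    (closed : PySem.Set String) (queue : List String)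
    (hJ : ∀ p ∈ F, ∀ y ∈ p.1, y ∉ closed → p ∈ PySem.Dict.getD idx y [])
    (hI : ∀ p ∈ F, (∀ y ∈ p.1, y ∈ closed) → ∀ z ∈ p.2, z ∈ closed ∨ z ∈ queue) :
    ∀ p ∈ F, (∀ y ∈ p.1, y ∈ pvClosLoop idx closed queue) →
      ∀ z ∈ p.2, z ∈ pvClosLoop idx closed queue := by
  revert hJ hI
  fun_induction pvClosLoop idx closed queue with
  | case1 =>
    intro hJ hI p hp hant z hz
    rcases hI p hp hant z hz with h | h
    · exact h
    · cases h
  | case2 idx closed x rest hmem ih =>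
    intro hJ hI
    refine ih hJ ?_
    intro p hp hant z hz
    rcases hI p hp hant z hz with h | h
    · exact Or.inl h
    · rcases List.mem_cons.mp h with rfl | h
      · exact Or.inl ((PySem.Set.contains_iff _ _).mp hmem)
      · exact Or.inr h
  | case3 idx closed x rest hmem closed2 ih =>
    intro hJ hI
    have hxc : x ∉ closed := by
      intro h
      exact hmem ((PySem.Set.contains_iff _ _).mpr h)
    refine ih ?_ ?_
    · -- hJ preserved
      intro p hp y hy hyc
      have hyx : y ≠ x := by
        intro h; subst h
        exact hyc ((PySem.Set.mem_add _ _ _).mpr (Or.inr rfl))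
      have hyc0 : y ∉ closed := fun h => hyc ((PySem.Set.mem_add _ _ _).mpr (Or.inl h))
      rw [pvGetD_erase, if_neg hyx]
      exact hJ p hp y hy hyc0
    · -- hI preserved
      intro p hp hant z hz
      by_cases hxp : x ∈ p.1
      · have hpidx : p ∈ PySem.Dict.getD idx x [] := hJ p hp x hxp hxc
        have hs : PySem.Set.issubset p.1 (PySem.Set.add closed x) = true :=
          (PySem.Set.issubset_iff _ _).mpr hant
        exact Or.inr (List.mem_append_right _
          ((pvMem_pushes _ _ _ _).mpr (Or.inr ⟨p, hpidx, hs, hz⟩)))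
      · have hant0 : ∀ y ∈ p.1, y ∈ closed := by
          intro y hy
          rcases (PySem.Set.mem_add _ _ _).mp (hant y hy) with h | rfl
          · exact h
          · exact absurd hy hxp
        rcases hI p hp hant0 z hz with h | h
        · exact Or.inl ((PySem.Set.mem_add _ _ _).mpr (Or.inl h))
        · rcases List.mem_cons.mp h with rfl | h
          · exact Or.inl ((PySem.Set.mem_add _ _ _).mpr (Or.inr rfl))
          · exact Or.inr (List.mem_append_left _ h)

theorem pvClotureB_iff (F : List (List String × List String)) (attrs : List String) (x : String) :
    x ∈ pvClotureB F attrs ↔ pvDeriv F (· ∈ attrs) x := by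
  constructor
  · intro hx
    refine pvClosLoop_min F _ _ _ ?_ ?_ ?_ ?_ x hx
    · intro p hp hant z hz
      exact pvDeriv.step hp hant hz
    · intro y q hq
      exact ((pvMem_buildIndex F y q).mp hq).1
    · intro y hy
      cases hy
    · intro y hy
      rcases List.mem_append.mp hy with hy | hy
      · exact pvDeriv.base hy
      · obtain ⟨p, hp, h1, hz⟩ := (pvMem_seed F y).mp hy
        exact pvDeriv.step hp (by simp [h1]) hz
  · intro hx
    induction hx with
    | base hp =>
      exact pvClosLoop_queue _ _ _ (List.mem_append_left _ hp)
    | step hd _ hc ih =>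
      refine pvClosLoop_closed F _ _ _ ?_ ?_ _ hd ih _ hc
      · intro p hp y hy _
        exact (pvMem_buildIndex F y p).mpr ⟨hp, hy⟩
      · intro p hp hant z hz
        have h1 : p.1 = [] := by
          cases h : p.1 with
          | nil => rfl
          | cons a l => exact absurd (hant a (by simp [h])) (by intro hmem; cases hmem)
        exact Or.inr (List.mem_append_right _ ((pvMem_seed F z).mpr ⟨p, hp, h1, hz⟩))

-- ---- bridging ----
theorem pvSuper_eq (F : List (List String × List String)) (R : List String)
    (K1 K2 : List String) (hK : ∀ x, x ∈ K1 ↔ x ∈ K2) :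
    est_super_cle F R K1 = PySem.Set.issubset R (pvClotureB F K2) := by
  have hmem : ∀ x, x ∈ calculer_cloture_attributs F K1 ↔ x ∈ pvClotureB F K2 := by
    intro x
    rw [pvClotureA_iff, pvClotureB_iff]
    exact ⟨pvDeriv_congr hK, pvDeriv_congr (fun y => (hK y).symm)⟩
  unfold est_super_cle
  rw [Bool.eq_iff_iff, PySem.Set.issubset_iff, PySem.Set.issubset_iff]
  constructor <;> intro h x hx
  · exact (hmem x).mp (h x hx)
  · exact (hmem x).mpr (h x hx)

-- ===== VERDICT (by name: the statement is the Claim_ definition above) =====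
theorem est_cle_candidate_spec : Claim_equal_est_cle_candidate := by
  intro F R K _
  unfold Spec_est_cle_candidate est_cle_candidate est_cle_candidate_alt
  rw [pvSuper_eq F R K K (fun _ => Iff.rfl)]
  have hpt : ∀ a : String,
      est_super_cle F R (PySem.Set.discard (PySem.Set.ofList K) a)
        = PySem.Set.issubset R (pvClotureB F (PySem.Set.diff (PySem.Set.ofList K) [a])) := by
    intro a
    apply pvSuper_eq
    intro x
    simp [PySem.Set.mem_discard, PySem.Set.mem_diff]
  simp only [hpt]
  cases hsup : PySem.Set.issubset R (pvClotureB F K) with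
  | false => simp
  | true =>
    simp only [Bool.not_true, Bool.false_eq_true, if_false]
    cases hany : K.any (fun a => PySem.Set.issubset R (pvClotureB F (PySem.Set.diff (PySem.Set.ofList K) [a]))) <;>
      simp [List.all_eq_not_any_not, hany]
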